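-- pv_equiv track=rewrite | github.com/liuyi-thu/rdma-fuzzing | lib/fuzz_mutate.py | _qp_path
-- ===== SOURCE A (Python) =====
-- _QP_NEXT = {"RESET": ["INIT"], "INIT": ["RTR"], "RTR": ["RTS"], "RTS": ["RTS"]}
--
-- def _qp_path(from_state: str, to_state: str):
--     """返回最短路径（不含起点，含终点）；不可达 None。"""
--     if from_state == to_state:
--         return []
--     cur, path, seen = from_state, [], set()
--     while cur != to_state:
--         if cur in seen:
--             return None
--         seen.add(cur)
--         nxts = _QP_NEXT.get(cur, [])
--         if not nxts:
--             return None
--         cur = nxts[0]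
--         path.append(cur)
--         if len(path) > 16:
--             return None
--     return path
-- ===== SOURCE B (Python) =====
-- _ORDER = ["RESET", "INIT", "RTR", "RTS"]
--
-- def _qp_path(from_state: str, to_state: str):
--     if from_state == to_state:
--         return []
--     if from_state not in _ORDER or to_state not in _ORDER:
--         return None
--     i = _ORDER.index(from_state)
--     j = _ORDER.index(to_state)
--     if j <= i:
--         return None
--     return _ORDER[i + 1:j + 1]
-- ===== Notes on version B (the rewrite author's own statement) =====
-- stated objective: simpler
-- what changed: Replaces the next-pointer walk with seen-set cycle detection and path-length cap by direct index arithmetic on the fixed linear chain RESET-INIT-RTR-RTS: the path is a slice of the order list.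
import Mathlib
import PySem

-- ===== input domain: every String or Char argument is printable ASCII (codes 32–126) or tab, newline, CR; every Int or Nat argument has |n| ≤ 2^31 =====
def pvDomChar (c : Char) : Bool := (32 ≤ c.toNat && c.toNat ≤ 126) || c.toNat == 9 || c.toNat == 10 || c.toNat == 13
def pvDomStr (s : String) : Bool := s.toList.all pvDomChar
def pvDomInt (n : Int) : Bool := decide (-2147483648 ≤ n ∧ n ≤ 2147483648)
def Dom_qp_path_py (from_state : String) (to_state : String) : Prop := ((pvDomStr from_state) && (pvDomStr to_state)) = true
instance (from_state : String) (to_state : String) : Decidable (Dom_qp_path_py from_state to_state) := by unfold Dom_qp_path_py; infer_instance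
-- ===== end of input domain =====

-- B replaces A's next-pointer walk (seen-set cycle detection, 16-step cap) with
-- direct index arithmetic on the fixed linear chain; objective: simpler.

-- ===== PORT A =====
def qpNext : PySem.Dict String (List String) :=
  PySem.Dict.ofList [("RESET", ["INIT"]), ("INIT", ["RTR"]), ("RTR", ["RTS"]), ("RTS", ["RTS"])]

-- the while loop; fuel only makes the recursion structural (the seen-set / length
-- checks bound the real loop to at most 17 iterations, so fuel 32 is never exhausted)
def qpLoop : Nat → String → String → List String → PySem.Set String → Option (List String)
  | 0, _, _, _, _ => none
  | fuel + 1, cur, to_state, path, seen =>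
    if cur == to_state then some path
    else if seen.contains cur then none
    else
      let seen' := seen.add cur
      match (PySem.Dict.get? qpNext cur).getD [] with
      | [] => none
      | nxt :: _ =>
        let path' := path ++ [nxt]
        if path'.length > 16 then none
        else qpLoop fuel nxt to_state path' seen'

def qp_path_py (from_state : String) (to_state : String) : Option (List String) :=
  if from_state == to_state then some []
  else qpLoop 32 from_state to_state [] (PySem.Set.ofList [])

-- ===== PORT B =====
def qpOrder : List String := ["RESET", "INIT", "RTR", "RTS"]

def qp_path_py_alt (from_state : String) (to_state : String) : Option (List String) :=
  if from_state == to_state then some []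
  else if ¬ (from_state ∈ qpOrder) ∨ ¬ (to_state ∈ qpOrder) then none
  else
    match PySem.List.index? qpOrder from_state, PySem.List.index? qpOrder to_state with
    | some i, some j =>
      if j ≤ i then none
      else some (PySem.List.slice qpOrder (some ((i : Int) + 1)) (some ((j : Int) + 1)))
    | _, _ => none

-- ===== PRECONDITION & SPEC =====
def Spec_qp_path_py (from_state : String) (to_state : String) (out : Option (List String)) : Prop := out = qp_path_py_alt from_state to_state
instance (from_state : String) (to_state : String) (out : Option (List String)) : Decidable (Spec_qp_path_py from_state to_state out) := by unfold Spec_qp_path_py; infer_instance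

-- ===== CLAIM (what is proved, stated in full; the proofs are below) =====
def Claim_equal_qp_path_py : Prop := ∀ (from_state : String) (to_state : String), Dom_qp_path_py from_state to_state → Spec_qp_path_py from_state to_state (qp_path_py from_state to_state)

-- ===== LEMMAS AND PROOFS =====

-- Both programs depend on the inputs only through their (in)equality with the four
-- state literals and with each other; we case on those and evaluate each branch.

theorem qpNext_eq_mk :
    qpNext = PySem.Dict.mk [("RESET", ["INIT"]), ("INIT", ["RTR"]), ("RTR", ["RTS"]), ("RTS", ["RTS"])] := by
  decide

theorem qp_A_unknown_from (f t : String)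
    (h1 : ¬ f = "RESET") (h2 : ¬ f = "INIT") (h3 : ¬ f = "RTR") (h4 : ¬ f = "RTS")
    (hft : ¬ f = t) : qp_path_py f t = none := by
  simp [qp_path_py, hft, qpLoop, qpNext_eq_mk, PySem.Dict.get?_mk_cons,
    PySem.Set.contains, PySem.Set.ofList,
    Ne.symm h1, Ne.symm h2, Ne.symm h3, Ne.symm h4,
    show ∀ x : String, PySem.Dict.get? (PySem.Dict.mk ([] : List (String × List String))) x = none
      from fun _ => rfl]

theorem qp_B_unknown_from (f t : String)
    (h1 : ¬ f = "RESET") (h2 : ¬ f = "INIT") (h3 : ¬ f = "RTR") (h4 : ¬ f = "RTS")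
    (hft : ¬ f = t) : qp_path_py_alt f t = none := by
  have hf : ¬ f ∈ qpOrder := by simp [qpOrder, h1, h2, h3, h4]
  simp [qp_path_py_alt, hft, hf]

theorem qp_B_unknown_to (f t : String) (hf : f ∈ qpOrder)
    (k1 : ¬ t = "RESET") (k2 : ¬ t = "INIT") (k3 : ¬ t = "RTR") (k4 : ¬ t = "RTS") :
    qp_path_py_alt f t = none := by
  have hft : ¬ f = t := by
    intro h; subst h
    simp only [qpOrder, List.mem_cons, List.not_mem_nil, or_false] at hf
    rcases hf with h | h | h | h <;> simp_all
  have ht : ¬ t ∈ qpOrder := by simp [qpOrder, k1, k2, k3, k4]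
  simp [qp_path_py_alt, hft, ht]

theorem qp_A_unknown_to (f : String) (t : String) (hf : f ∈ qpOrder)
    (k1 : ¬ t = "RESET") (k2 : ¬ t = "INIT") (k3 : ¬ t = "RTR") (k4 : ¬ t = "RTS") :
    qp_path_py f t = none := by
  simp only [qpOrder, List.mem_cons, List.not_mem_nil, or_false] at hf
  rcases hf with h | h | h | h <;>
    (subst h
     simp [qp_path_py, qpLoop, qpNext_eq_mk, PySem.Dict.get?_mk_cons,
       PySem.Set.contains, PySem.Set.ofList, PySem.Set.add,
       Ne.symm k1, Ne.symm k2, Ne.symm k3, Ne.symm k4])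

-- ===== VERDICT (by name: the statement is the Claim_ definition above) =====
theorem qp_path_py_spec : Claim_equal_qp_path_py := by
  intro f t _
  unfold Spec_qp_path_py
  by_cases hft : f = t
  · simp [qp_path_py, qp_path_py_alt, hft]
  · by_cases hf : f ∈ qpOrder
    · by_cases ht : t ∈ qpOrder
      · simp only [qpOrder, List.mem_cons, List.not_mem_nil, or_false] at hf ht
        rcases hf with h | h | h | h <;> rcases ht with k | k | k | k <;>
          (subst h; subst k) <;>
          first
            | (exact absurd rfl hft)
            | decide
      · simp only [qpOrder, List.mem_cons, List.not_mem_nil, or_false] at ht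
        push_neg at ht
        obtain ⟨k1, k2, k3, k4⟩ := ht
        rw [qp_A_unknown_to f t hf k1 k2 k3 k4, qp_B_unknown_to f t hf k1 k2 k3 k4]
    · simp only [qpOrder, List.mem_cons, List.not_mem_nil, or_false] at hf
      push_neg at hf
      obtain ⟨h1, h2, h3, h4⟩ := hf
      rw [qp_A_unknown_from f t h1 h2 h3 h4 hft, qp_B_unknown_from f t h1 h2 h3 h4 hft]
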